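-- pv_equiv track=rewrite | github.com/SymmetricChaos/NumberTheory | Numerals/Factoradic.py | factoradic
-- ===== SOURCE A (Python) =====
-- def factoradic(n):
--     L = []
--     ctr = 1
--     while n > 0:
--         n, l = divmod(n,ctr)
--         L.append(l)
--         ctr += 1
--     L.reverse()
--     return L
-- ===== SOURCE B (Python) =====
-- def factoradic(n):
--     if n <= 0:
--         return []
--     f = 1
--     m = 0
--     while f <= n:
--         m += 1
--         f *= m
--     res = []
--     j = m
--     while j > 0:
--         f //= j
--         res.append((n // f) % j)
--         j -= 1
--     return res
-- ===== Notes on version B (the rewrite author's own statement) =====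
-- stated objective: alternative
-- what changed: A repeatedly divmods a shrinking quotient by an increasing counter and reverses the collected remainders; B first finds the digit count m (smallest m with m! > n) by multiplying factorials up, then emits each digit directly as (n // (j-1)!) % j for j = m down to 1, so digits come out most-significant first and no reverse is needed.
import Mathlib
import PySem

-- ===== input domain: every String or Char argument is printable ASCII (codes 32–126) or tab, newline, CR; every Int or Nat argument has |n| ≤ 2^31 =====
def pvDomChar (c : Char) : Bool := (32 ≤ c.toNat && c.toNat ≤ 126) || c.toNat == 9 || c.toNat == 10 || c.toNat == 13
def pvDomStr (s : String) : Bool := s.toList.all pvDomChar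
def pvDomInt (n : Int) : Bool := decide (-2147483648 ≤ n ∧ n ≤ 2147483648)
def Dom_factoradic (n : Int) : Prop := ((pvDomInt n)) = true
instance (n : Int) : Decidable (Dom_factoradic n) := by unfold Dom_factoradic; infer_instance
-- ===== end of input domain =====

-- B replaces A's shrinking-quotient divmod loop (low digit first, then reverse) by first
-- finding the digit count m (smallest m with m! > n) and then emitting each digit directly
-- as (n // (j-1)!) % j from j = m down to 1, so no reverse is needed (objective: alternative).

-- ===== PORT A =====
-- while n > 0: n, l = divmod(n, ctr); L.append(l); ctr += 1   (fuel only makes it total;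
-- n.toNat + 2 steps always suffice since n is unchanged once and then strictly shrinks)
def factLoop (fuel : Nat) (n ctr : Int) (L : List Int) : List Int :=
  match fuel with
  | 0 => L
  | fuel + 1 =>
      if n > 0 then
        factLoop fuel (PySem.Int.floordiv n ctr) (ctr + 1) (L ++ [PySem.Int.mod n ctr])
      else L

def factoradic (n : Int) : List Int :=
  (factLoop (n.toNat + 2) n 1 []).reverse

-- ===== PORT B =====
-- while f <= n: m += 1; f *= m   (fuel only makes it total; n.toNat + 2 steps suffice)
def growB (fuel : Nat) (f m n : Int) : Int × Int :=
  match fuel with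
  | 0 => (f, m)
  | fuel + 1 => if f ≤ n then growB fuel (f * (m + 1)) (m + 1) n else (f, m)

-- while j > 0: f //= j; res.append((n // f) % j); j -= 1
def emitB (j f n : Int) (res : List Int) : List Int :=
  if h : 0 < j then
    emitB (j - 1) (PySem.Int.floordiv f j) n
      (res ++ [PySem.Int.mod (PySem.Int.floordiv n (PySem.Int.floordiv f j)) j])
  else res
termination_by j.toNat
decreasing_by omega

def factoradic_alt (n : Int) : List Int :=
  if n ≤ 0 then []
  else
    let fm := growB (n.toNat + 2) 1 0 n
    emitB fm.2 fm.1 n []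

-- ===== PRECONDITION & SPEC =====
def Spec_factoradic (n : Int) (out : List Int) : Prop := out = factoradic_alt n
instance (n : Int) (out : List Int) : Decidable (Spec_factoradic n out) := by unfold Spec_factoradic; infer_instance

-- ===== CLAIM (what is proved, stated in full; the proofs are below) =====
def Claim_equal_factoradic : Prop := ∀ (n : Int), Dom_factoradic n → Spec_factoradic n (factoradic n)

-- ===== LEMMAS AND PROOFS =====

-- integer factorial (spec-side helper)
def facI (i : Int) : Int := (Nat.factorial i.toNat : Int)

theorem facI_pos (i : Int) : 0 < facI i := by
  unfold facI; exact_mod_cast Nat.factorial_pos _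

theorem facI_succ {i : Int} (hi : 0 ≤ i) : facI (i + 1) = facI i * (i + 1) := by
  unfold facI
  have h : (i + 1).toNat = i.toNat + 1 := by omega
  rw [h, Nat.factorial_succ]
  push_cast
  rw [Int.toNat_of_nonneg hi]; ring

theorem self_le_facI {i : Int} (hi : 0 ≤ i) : i ≤ facI i := by
  unfold facI
  have := Nat.self_le_factorial i.toNat
  omega

theorem facI_div_self {j : Int} (hj : 0 < j) :
    PySem.Int.floordiv (facI j) j = facI (j - 1) := by
  rw [PySem.Int.floordiv_eq_ediv_of_pos hj]
  have h : facI j = facI (j - 1) * j := by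
    have := facI_succ (i := j - 1) (by omega)
    simpa using this
  rw [h, Int.mul_ediv_cancel _ (by omega)]

theorem factLoop_spec (k : Nat) : ∀ (fuel : Nat) (n ctr m : Int) (L : List Int),
    0 ≤ n → 1 ≤ ctr → ctr + (k : Int) = m + 1 →
    n < facI m → (∀ j : Int, 0 ≤ j → j < m → facI j ≤ n) →
    k ≤ fuel →
    factLoop fuel (n / facI (ctr - 1)) ctr L =
      L ++ (List.range k).map
        (fun (i : Nat) => (n / facI (ctr - 1 + (i : Int))) % (ctr + (i : Int))) := by
  induction k with
  | zero =>
    intro fuel n ctr m L hn hctr hk hmax _ _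
    have hm : ctr - 1 = m := by omega
    have h0 : n / facI (ctr - 1) = 0 := by
      rw [hm]; exact Int.ediv_eq_zero_of_lt hn hmax
    rw [h0]
    cases fuel with
    | zero => simp [factLoop]
    | succ f => simp [factLoop]
  | succ k ih =>
    intro fuel n ctr m L hn hctr hk hmax hmin hfuel
    have hctrm : ctr ≤ m := by omega
    have hfle : facI (ctr - 1) ≤ n := hmin (ctr - 1) (by omega) (by omega)
    have hfpos : 0 < facI (ctr - 1) := facI_pos _
    have hqpos : 0 < n / facI (ctr - 1) := by
      have : 1 ≤ n / facI (ctr - 1) := Int.le_ediv_iff_mul_le hfpos |>.2 (by omega)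
      omega
    obtain ⟨fuel, rfl⟩ : ∃ f, fuel = f + 1 := ⟨fuel - 1, by omega⟩
    rw [factLoop, if_pos hqpos]
    rw [PySem.Int.floordiv_eq_ediv_of_pos (by omega),
        PySem.Int.mod_eq_emod_of_pos (by omega)]
    have hdiv : n / facI (ctr - 1) / ctr = n / facI (ctr + 1 - 1) := by
      rw [Int.ediv_ediv_of_nonneg (by omega : (0:Int) ≤ facI (ctr - 1))]
      congr 1
      have h1 := facI_succ (i := ctr - 1) (by omega)
      have h2 : ctr - 1 + 1 = ctr := by ring
      rw [h2] at h1
      rw [show ctr + 1 - 1 = (ctr - 1) + 1 by ring, facI_succ (by omega : (0:Int) ≤ ctr - 1), h2]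
    rw [hdiv]
    rw [ih fuel n (ctr + 1) m _ hn (by omega) (by omega) hmax hmin (by omega)]
    rw [List.append_assoc, List.singleton_append, List.range_succ_eq_map,
        List.map_cons, List.map_map]
    refine congrArg (L ++ ·) ?_
    refine List.cons_eq_cons.mpr ⟨by norm_num, ?_⟩
    refine List.map_congr_left fun a ha => ?_
    simp only [Function.comp_apply]
    push_cast
    rw [show ctr + 1 - 1 + (a : Int) = ctr - 1 + ((a : Int) + 1) by ring,
        show ctr + 1 + (a : Int) = ctr + ((a : Int) + 1) by ring]

theorem grow_spec (fuel : Nat) : ∀ (m n : Int), 0 ≤ m → n.toNat + 1 ≤ fuel + m.toNat →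
    ∃ M : Int, growB fuel (facI m) m n = (facI M, M) ∧ m ≤ M ∧ 0 ≤ M ∧ n < facI M ∧
      (∀ j : Int, m ≤ j → j < M → facI j ≤ n) := by
  induction fuel with
  | zero =>
    intro m n hm hfuel
    refine ⟨m, rfl, le_refl _, hm, ?_, by omega⟩
    have h1 : n < m := by omega
    have h2 := self_le_facI hm
    omega
  | succ fuel ih =>
    intro m n hm hfuel
    rw [growB]
    by_cases hle : facI m ≤ n
    · rw [if_pos hle]
      have hself := self_le_facI hm
      have hmn : m ≤ n := le_trans hself hle
      have hstep : facI m * (m + 1) = facI (m + 1) := (facI_succ hm).symm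
      rw [hstep]
      obtain ⟨M, hM, hle', hM0, hmax, hmin⟩ := ih (m + 1) n (by omega) (by omega)
      refine ⟨M, hM, by omega, hM0, hmax, ?_⟩
      intro j hj1 hj2
      rcases eq_or_lt_of_le hj1 with rfl | h
      · exact hle
      · exact hmin j (by omega) hj2
    · rw [if_neg hle]
      exact ⟨m, rfl, le_refl _, hm, by omega, by omega⟩

theorem emit_spec (k : Nat) : ∀ (j n : Int) (res : List Int), j = (k : Int) →
    emitB j (facI j) n res =
      res ++ (List.range k).map
        (fun (i : Nat) => (n / facI (j - 1 - (i : Int))) % (j - (i : Int))) := by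
  induction k with
  | zero =>
    intro j n res hj
    rw [emitB]
    simp [hj]
  | succ k ih =>
    intro j n res hj
    have hjpos : 0 < j := by omega
    rw [emitB, dif_pos hjpos, facI_div_self hjpos]
    rw [PySem.Int.floordiv_eq_ediv_of_pos (facI_pos _),
        PySem.Int.mod_eq_emod_of_pos hjpos]
    rw [ih (j - 1) n _ (by omega)]
    rw [List.append_assoc, List.singleton_append, List.range_succ_eq_map,
        List.map_cons, List.map_map]
    refine congrArg (res ++ ·) ?_
    refine List.cons_eq_cons.mpr ⟨by norm_num, ?_⟩
    refine List.map_congr_left fun a ha => ?_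
    simp only [Function.comp_apply]
    push_cast
    rw [show j - 1 - 1 - (a : Int) = j - 1 - ((a : Int) + 1) by ring,
        show j - 1 - (a : Int) = j - ((a : Int) + 1) by ring]

-- ===== VERDICT (by name: the statement is the Claim_ definition above) =====
theorem factoradic_spec : Claim_equal_factoradic := by
  intro n _
  unfold Spec_factoradic factoradic factoradic_alt
  by_cases hn : n ≤ 0
  · rw [if_pos hn]
    cases h : n.toNat + 2 with
    | zero => simp [factLoop]
    | succ f => simp [factLoop, hn]
  · rw [if_neg hn]
    have hn0 : 0 ≤ n := by omega
    -- characterize B's m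
    have hfac0 : facI 0 = 1 := by decide
    obtain ⟨M, hgrow, hM0le, hM0, hmax, hmin⟩ := by
      have := grow_spec (n.toNat + 2) 0 n (by omega) (by omega)
      rwa [hfac0] at this
    have hmin' : ∀ j : Int, 0 ≤ j → j < M → facI j ≤ n := fun j h1 h2 => hmin j h1 h2
    have hM1 : 1 ≤ M := by
      by_contra h
      have : M = 0 := by omega
      rw [this, hfac0] at hmax; omega
    have hMn : M - 1 ≤ n :=
      le_trans (self_le_facI (by omega)) (hmin' (M - 1) (by omega) (by omega))
    -- A's side
    have hA := factLoop_spec M.toNat (n.toNat + 2) n 1 M []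
      hn0 (by omega) (by omega) hmax hmin' (by omega)
    have hdiv1 : n / facI (1 - 1) = n := by
      norm_num [hfac0]
    rw [hdiv1] at hA
    -- B's side
    rw [hgrow]
    have hB := emit_spec M.toNat M n [] (by omega)
    rw [hB, hA]
    simp only [List.nil_append]
    -- reversed ascending list = descending list
    apply List.ext_getElem
    · simp
    · intro i h1 h2
      simp only [List.length_reverse, List.length_map, List.length_range] at h1 h2
      simp only [List.getElem_reverse, List.getElem_map, List.getElem_range,
                 List.length_map, List.length_range]
      rw [show (1:Int) - 1 + ((M.toNat - 1 - i : Nat) : Int) = M - 1 - (i : Int) by omega,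
          show (1:Int) + ((M.toNat - 1 - i : Nat) : Int) = M - (i : Int) by omega]
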